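-- pv_equiv track=rewrite | github.com/sunilgitb/DSAlgo-Python | 03_Sorting-Algorithms/Remove Covered Intervals.py | removeCoveredIntervals_stack
-- ===== SOURCE A (Python) =====
-- from typing import List
--
-- def removeCoveredIntervals_stack(intervals: List[List[int]]) -> int:
--     intervals.sort(key=lambda x: (x[0], -x[1]), reverse=True)
--     stack = []
--     cnt = 0
--     for l, r in intervals:
--         while stack and l <= stack[-1][0] and stack[-1][1] <= r:
--             stack.pop()
--             cnt += 1
--         stack.append((l, r))
--
--     return len(intervals) - cnt
-- ===== SOURCE B (Python) =====
-- from typing import List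
--
-- def removeCoveredIntervals_stack(intervals: List[List[int]]) -> int:
--     # same in-place sort as A (the caller observes the same mutation)
--     intervals.sort(key=lambda x: (x[0], -x[1]), reverse=True)
--     # reversed() yields ascending start, and for equal starts descending end:
--     # an interval is uncovered exactly when its end exceeds every end seen so far
--     uncovered = 0
--     prev_end = None
--     for l, r in reversed(intervals):
--         if prev_end is None or r > prev_end:
--             uncovered += 1
--             prev_end = r
--     return uncovered
-- ===== Notes on version B (the rewrite author's own statement) =====
-- stated objective: simpler
-- what changed: B keeps A's identical in-place sort but replaces the stack of intervals plus covered-counter with a single scan of the reversed list that maintains one scalar running-max right endpoint and counts uncovered intervals directly.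
import Mathlib
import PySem

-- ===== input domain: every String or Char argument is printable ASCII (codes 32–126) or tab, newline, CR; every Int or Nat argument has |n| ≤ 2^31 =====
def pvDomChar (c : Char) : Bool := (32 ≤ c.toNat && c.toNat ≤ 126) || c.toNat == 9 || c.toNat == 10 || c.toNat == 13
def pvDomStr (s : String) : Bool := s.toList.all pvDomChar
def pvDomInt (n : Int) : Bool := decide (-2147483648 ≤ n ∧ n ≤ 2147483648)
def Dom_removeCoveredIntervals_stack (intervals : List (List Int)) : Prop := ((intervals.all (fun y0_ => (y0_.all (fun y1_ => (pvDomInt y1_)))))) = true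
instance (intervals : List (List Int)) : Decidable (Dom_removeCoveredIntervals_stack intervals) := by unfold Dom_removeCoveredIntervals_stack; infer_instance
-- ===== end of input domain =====

-- B keeps A's identical in-place sort (same caller-visible mutation) but replaces the stack
-- with one reversed scan that counts uncovered intervals via a running-max right endpoint.
-- Both A and B sort the argument in place; the theorems below are about the return value
-- (the mutation is identical in A and B).

-- ===== PORT A =====
-- the sort key (x[0], -x[1]); pyGetD's default is never used on Pre_ inputs (length 2)
def pvKey1 (x : List Int) : Int := PySem.List.pyGetD x 0 0
def pvKey2 (x : List Int) : Int := -(PySem.List.pyGetD x 1 0)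

-- the inner 'while stack and l <= stack[-1][0] and stack[-1][1] <= r: stack.pop(); cnt += 1'
-- (stack top = list head)
def pvPopA : List (Int × Int) → Int → Int → Int → List (Int × Int) × Int
  | [], cnt, _, _ => ([], cnt)
  | (tl, tr) :: rest, cnt, l, r =>
    if l ≤ tl ∧ tr ≤ r then pvPopA rest (cnt + 1) l r
    else ((tl, tr) :: rest, cnt)

-- one iteration of A's for-loop; a sublist not of length 2 raises in Python (outside Pre_)
def pvStepA (st : List (Int × Int) × Int) (iv : List Int) : List (Int × Int) × Int :=
  match iv with
  | [l, r] =>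
    let p := pvPopA st.1 st.2 l r
    ((l, r) :: p.1, p.2)
  | _ => st

def removeCoveredIntervals_stack (intervals : List (List Int)) : Int :=
  let s := PySem.List.sorted2 intervals pvKey1 pvKey2 true
  let res := s.foldl pvStepA ([], 0)
  (s.length : Int) - res.2

-- ===== PORT B =====
-- one iteration of B's loop over reversed(intervals): state (prev_end, uncovered)
def pvStepB (st : Option Int × Int) (iv : List Int) : Option Int × Int :=
  match iv with
  | [_, r] =>
    match st.1 with
    | none => (some r, st.2 + 1)
    | some p => if p < r then (some r, st.2 + 1) else st
  | _ => st

def removeCoveredIntervals_stack_alt (intervals : List (List Int)) : Int :=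
  let s := PySem.List.sorted2 intervals pvKey1 pvKey2 true
  (s.reverse.foldl pvStepB (none, 0)).2

-- ===== PRECONDITION & SPEC =====
-- Pre_ excludes exactly the inputs where Python A raises: a sublist of length ≠ 2 makes the
-- sort key (IndexError) or the tuple unpacking 'for l, r in intervals' (ValueError) raise.
def Pre_removeCoveredIntervals_stack (intervals : List (List Int)) : Prop :=
  ∀ iv ∈ intervals, iv.length = 2
instance (intervals : List (List Int)) : Decidable (Pre_removeCoveredIntervals_stack intervals) := by
  unfold Pre_removeCoveredIntervals_stack; infer_instance

def pvWitness_removeCoveredIntervals_stack : List (List Int) := [[1, 4], [2, 3], [0, 1]]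

def Spec_removeCoveredIntervals_stack (intervals : List (List Int)) (out : Int) : Prop := out = removeCoveredIntervals_stack_alt intervals
instance (intervals : List (List Int)) (out : Int) : Decidable (Spec_removeCoveredIntervals_stack intervals out) := by unfold Spec_removeCoveredIntervals_stack; infer_instance

-- ===== CLAIM (what is proved, stated in full; the proofs are below) =====
def Claim_equal_removeCoveredIntervals_stack : Prop := ∀ (intervals : List (List Int)), Dom_removeCoveredIntervals_stack intervals → Pre_removeCoveredIntervals_stack intervals → Spec_removeCoveredIntervals_stack intervals (removeCoveredIntervals_stack intervals)

-- ===== LEMMAS AND PROOFS =====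

-- pair-level view of A's loop
def pvStepA' (st : List (Int × Int) × Int) (x : Int × Int) : List (Int × Int) × Int :=
  let p := pvPopA st.1 st.2 x.1 x.2
  (x :: p.1, p.2)

def pvStepB' (st : Option Int × Int) (x : Int × Int) : Option Int × Int :=
  match st.1 with
  | none => (some x.2, st.2 + 1)
  | some p => if p < x.2 then (some x.2, st.2 + 1) else st

-- abstract stack step: pop everything with end ≤ x.2, push x
def pvG (st : List (Int × Int)) (x : Int × Int) : List (Int × Int) :=
  x :: st.dropWhile (fun y => decide (y.2 ≤ x.2))

-- optional max of ends
def pvOMaxD (e : Int) : Option Int → Int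
  | none => e
  | some v => max e v

def pvMEnd : List (Int × Int) → Option Int
  | [] => none
  | x :: t => some (pvOMaxD x.2 (pvMEnd t))

def pvPLe (e : Int) : Option Int → Bool
  | none => false
  | some v => decide (e ≤ v)

def pvOLt : Option Int → Int → Bool
  | none, _ => true
  | some p, e => decide (p < e)

-- B's count, recursively
def pvBC : List (Int × Int) → Option Int → Int
  | [], _ => 0
  | x :: t, prev => if pvOLt prev x.2 then 1 + pvBC t (some x.2) else pvBC t prev

def pvAPrev (prev : Option Int) (q : List (Int × Int)) : Option Int :=
  q.foldl (fun m x => some (pvOMaxD x.2 m)) prev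

def pvToPair (iv : List Int) : Int × Int :=
  (PySem.List.pyGetD iv 0 0, PySem.List.pyGetD iv 1 0)

theorem pvPLe_none (e : Int) : pvPLe e none = false := rfl
theorem pvPLe_some (e v : Int) : pvPLe e (some v) = decide (e ≤ v) := rfl
theorem pvMEnd_cons (x : Int × Int) (t : List (Int × Int)) :
    pvMEnd (x :: t) = some (pvOMaxD x.2 (pvMEnd t)) := rfl

theorem pvDrop_false {α : Type} (l : List α) : l.dropWhile (fun _ => false) = l := by
  induction l with
  | nil => rfl
  | cons y l ih => rw [List.dropWhile_cons_of_neg (by simp)]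

theorem pvPopA_eq (st : List (Int × Int)) (cnt l r : Int) (h : ∀ y ∈ st, l ≤ y.1) :
    pvPopA st cnt l r =
      (st.dropWhile (fun y => decide (y.2 ≤ r)),
       cnt + ((st.takeWhile (fun y => decide (y.2 ≤ r))).length : Int)) := by
  induction st generalizing cnt with
  | nil => simp [pvPopA]
  | cons y st ih =>
    obtain ⟨ty, ry⟩ := y
    have hl : l ≤ ty := h (ty, ry) (by simp)
    by_cases hr : ry ≤ r
    · rw [pvPopA, if_pos ⟨hl, hr⟩, ih _ (fun z hz => h z (by simp [hz])),
        List.dropWhile_cons_of_pos (by simpa using hr),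
        List.takeWhile_cons_of_pos (by simpa using hr)]
      refine Prod.ext rfl ?_
      simp
      omega
    · rw [pvPopA, if_neg (by tauto),
        List.dropWhile_cons_of_neg (by simpa using hr),
        List.takeWhile_cons_of_neg (by simpa using hr)]
      simp

theorem pvA1 (ps : List (Int × Int)) (st : List (Int × Int)) (cnt : Int)
    (hcross : ∀ x ∈ ps, ∀ y ∈ st, x.1 ≤ y.1)
    (hpw : ps.Pairwise (fun a b => b.1 ≤ a.1)) :
    ps.foldl pvStepA' (st, cnt) =
      (ps.foldl pvG st,
       cnt + (st.length : Int) + (ps.length : Int) - ((ps.foldl pvG st).length : Int)) := by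
  induction ps generalizing st cnt with
  | nil => simp
  | cons x ps ih =>
    have hx : ∀ y ∈ st, x.1 ≤ y.1 := hcross x (by simp)
    have hstep : pvStepA' (st, cnt) x =
        (pvG st x, cnt + ((st.takeWhile (fun y => decide (y.2 ≤ x.2))).length : Int)) := by
      simp [pvStepA', pvG, pvPopA_eq st cnt x.1 x.2 hx]
    have hcross' : ∀ z ∈ ps, ∀ y ∈ pvG st x, z.1 ≤ y.1 := by
      intro z hz y hy
      simp only [pvG, List.mem_cons] at hy
      rcases hy with hy | hy
      · subst hy; exact (List.pairwise_cons.1 hpw).1 z hz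
      · exact hcross z (by simp [hz]) y ((List.dropWhile_sublist _).subset hy)
    have hsplit := congrArg List.length
      (List.takeWhile_append_dropWhile (p := fun y => decide (y.2 ≤ x.2)) (l := st))
    rw [List.length_append] at hsplit
    have hglen : (pvG st x).length
        = (st.dropWhile (fun y => decide (y.2 ≤ x.2))).length + 1 := by
      simp [pvG]
    rw [List.foldl_cons, List.foldl_cons, hstep, ih _ _ hcross' (List.pairwise_cons.1 hpw).2]
    refine Prod.ext rfl ?_
    simp only [List.length_cons]
    push_cast
    omega

theorem pvBfold (q : List (Int × Int)) (prev : Option Int) (c : Int) :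
    (q.foldl pvStepB' (prev, c)).2 = c + pvBC q prev := by
  induction q generalizing prev c with
  | nil => simp [pvBC]
  | cons x q ih =>
    rw [List.foldl_cons]
    cases prev with
    | none => simp [pvStepB', pvBC, pvOLt, ih]; ring
    | some p =>
      by_cases hp : p < x.2
      · simp [pvStepB', pvBC, pvOLt, hp, ih]; ring
      · simp [pvStepB', pvBC, pvOLt, hp, ih]

theorem pvDD {α : Type} (p q : α → Bool) (l : List α) (h : ∀ y, q y = true → p y = true) :
    (l.dropWhile q).dropWhile p = l.dropWhile p := by
  induction l with
  | nil => rfl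
  | cons y l ih =>
    by_cases hq : q y = true
    · rw [List.dropWhile_cons_of_pos hq, ih, List.dropWhile_cons_of_pos (h y hq)]
    · rw [List.dropWhile_cons_of_neg hq]

theorem pvHE (x : Int × Int) (t : List (Int × Int)) (st : List (Int × Int)) :
    List.dropWhile (fun y => pvPLe y.2 (pvMEnd t)) (pvG st x)
      = List.dropWhile (fun y => pvPLe y.2 (pvMEnd t)) [x]
        ++ List.dropWhile (fun y => pvPLe y.2 (pvMEnd (x :: t))) st := by
  cases hm : pvMEnd t with
  | none =>
    rw [pvG, List.dropWhile_cons_of_neg (by simp [hm, pvPLe_none]),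
      List.dropWhile_cons_of_neg (by simp [hm, pvPLe_none]), pvMEnd_cons, hm]
    rfl
  | some m =>
    by_cases hx : x.2 ≤ m
    · have hx1 : pvPLe x.2 (some m) = true := by simp [pvPLe_some, hx]
      have hmax : pvOMaxD x.2 (some m) = m := by simp [pvOMaxD]; omega
      rw [pvG, List.dropWhile_cons_of_pos (by simp [hm, hx1]),
        List.dropWhile_cons_of_pos (by simp [hm, hx1]), pvMEnd_cons, hm, hmax,
        List.dropWhile_nil, List.nil_append]
      exact pvDD _ _ st (by intro y hy; simp only [pvPLe_some, decide_eq_true_eq] at *; omega)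
    · have hx1 : pvPLe x.2 (some m) = false := by simp [pvPLe_some]; omega
      have hmax : pvOMaxD x.2 (some m) = x.2 := by simp [pvOMaxD]; omega
      rw [pvG, List.dropWhile_cons_of_neg (by simp [hm, hx1]),
        List.dropWhile_cons_of_neg (by simp [hm, hx1]), pvMEnd_cons, hm, hmax]
      rfl

theorem pvMAIN (ps : List (Int × Int)) (st : List (Int × Int)) :
    ps.foldl pvG st = ps.foldl pvG [] ++ st.dropWhile (fun y => pvPLe y.2 (pvMEnd ps)) := by
  induction ps generalizing st with
  | nil =>
    show st = [] ++ st.dropWhile (fun y => pvPLe y.2 none)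
    simp only [pvPLe_none, List.nil_append]
    exact (pvDrop_false st).symm
  | cons x t ih =>
    rw [List.foldl_cons, List.foldl_cons, ih (pvG st x), ih (pvG [] x)]
    have hG : pvG [] x = [x] := rfl
    rw [hG, pvHE x t st, ← List.append_assoc]

theorem pvBstep_prev (prev : Option Int) (e : Int) :
    (if pvOLt prev e = true then some e else prev) = some (pvOMaxD e prev) := by
  cases prev with
  | none => simp [pvOLt, pvOMaxD]
  | some p =>
    by_cases hp : p < e
    · simp [pvOLt, pvOMaxD, hp]; omega
    · simp [pvOLt, pvOMaxD, hp]; omega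

theorem pvBC_append (q : List (Int × Int)) (x : Int × Int) (prev : Option Int) :
    pvBC (q ++ [x]) prev = pvBC q prev + (if pvOLt (pvAPrev prev q) x.2 then 1 else 0) := by
  induction q generalizing prev with
  | nil =>
    simp only [List.nil_append, pvBC, pvAPrev, List.foldl_nil]
    by_cases h : pvOLt prev x.2 <;> simp [h]
  | cons y q ih =>
    have hpr : pvAPrev prev (y :: q)
        = pvAPrev (if pvOLt prev y.2 = true then some y.2 else prev) q := by
      rw [pvBstep_prev]; rfl
    by_cases hy : pvOLt prev y.2 = true
    · simp only [List.cons_append, pvBC, hy, ite_true, ih, hpr]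
      ring
    · simp only [List.cons_append, pvBC, hy, Bool.false_eq_true, ite_false, ih, hpr]

theorem pvAPrev_reverse (t : List (Int × Int)) :
    pvAPrev none t.reverse = pvMEnd t := by
  induction t with
  | nil => rfl
  | cons x t ih =>
    have h1 : pvAPrev none (t.reverse ++ [x]) = some (pvOMaxD x.2 (pvAPrev none t.reverse)) := by
      simp [pvAPrev]
    rw [List.reverse_cons, h1, ih, pvMEnd_cons]

theorem pvOLt_not_pLe (m : Option Int) (e : Int) : pvOLt m e = !(pvPLe e m) := by
  cases m with
  | none => rfl
  | some v =>
    by_cases h : v < e <;> simp [pvOLt, pvPLe, h] <;> omega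

theorem pvRECLEN (ps : List (Int × Int)) :
    ((ps.foldl pvG []).length : Int) = pvBC ps.reverse none := by
  induction ps with
  | nil => simp [pvBC]
  | cons x t ih =>
    have hG : pvG [] x = [x] := rfl
    rw [List.foldl_cons, hG, pvMAIN t [x], List.reverse_cons, pvBC_append, pvAPrev_reverse,
      pvOLt_not_pLe, List.length_append]
    by_cases h : pvPLe x.2 (pvMEnd t) = true
    · rw [List.dropWhile_cons_of_pos (by simpa using h), List.dropWhile_nil]
      simp [h, ← ih]
    · rw [List.dropWhile_cons_of_neg (by simp [h])]
      have hb : (!pvPLe x.2 (pvMEnd t)) = true := by simp [h]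
      rw [hb, if_pos rfl]
      simp only [List.length_cons, List.length_nil]
      push_cast
      omega

-- transport from List Int sublists to pairs
theorem pvMap_repr (s : List (List Int)) (h : ∀ iv ∈ s, iv.length = 2) :
    s = (s.map pvToPair).map (fun p => [p.1, p.2]) := by
  induction s with
  | nil => rfl
  | cons iv s ih =>
    have h2 : iv.length = 2 := h iv (by simp)
    match iv, h2 with
    | [a, b], _ =>
      simp only [List.map_cons]
      rw [← ih (fun z hz => h z (by simp [hz]))]
      simp [pvToPair, PySem.List.pyGetD]

-- generic Pairwise preservation for insertBy
theorem pvInsertBy_pairwise {α : Type} (R : α → α → Prop) (before : α → α → Bool)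
    (htrans : ∀ a b c, R a b → R b c → R a c)
    (hb : ∀ a b, before a b = true → R a b)
    (hnb : ∀ a b, ¬ before a b = true → R b a)
    (x : α) (ys : List α) (hys : ys.Pairwise R) :
    (PySem.List.insertBy before x ys).Pairwise R := by
  induction ys with
  | nil => simp [PySem.List.insertBy]
  | cons y ys ih =>
    rw [PySem.List.insertBy]
    by_cases hxy : before x y = true
    · rw [if_pos hxy]
      refine List.pairwise_cons.2 ⟨?_, hys⟩
      intro w hw
      simp only [List.mem_cons] at hw
      rcases hw with rfl | hw
      · exact hb x w hxy
      · exact htrans x y w (hb x y hxy) ((List.pairwise_cons.1 hys).1 w hw)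
    · rw [if_neg hxy]
      refine List.pairwise_cons.2 ⟨?_, ih (List.pairwise_cons.1 hys).2⟩
      intro w hw
      rw [PySem.List.insertBy_mem_iff] at hw
      rcases hw with rfl | hw
      · exact hnb _ y hxy
      · exact (List.pairwise_cons.1 hys).1 w hw

-- the comparison sorted2 uses for key=(x[0], -x[1]), reverse=True
def pvBefore (a b : List Int) : Bool :=
  decide (pvKey1 b < pvKey1 a) || (!decide (pvKey1 a < pvKey1 b) && decide (pvKey2 b < pvKey2 a))

theorem pvSorted2_rev_pairwise (xs : List (List Int)) :
    (PySem.List.sorted2 xs pvKey1 pvKey2 true).Pairwise (fun a b => pvKey1 b ≤ pvKey1 a) := by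
  have hdef : PySem.List.sorted2 xs pvKey1 pvKey2 true
      = xs.foldl (fun acc x => PySem.List.insertBy pvBefore x acc) [] := rfl
  rw [hdef]
  have hgen : ∀ (l acc : List (List Int)), acc.Pairwise (fun a b => pvKey1 b ≤ pvKey1 a) →
      (l.foldl (fun acc x => PySem.List.insertBy pvBefore x acc) acc).Pairwise
        (fun a b => pvKey1 b ≤ pvKey1 a) := by
    intro l
    induction l with
    | nil => intro acc hp; simpa using hp
    | cons x l ih =>
      intro acc hp
      rw [List.foldl_cons]
      refine ih _ ?_
      refine pvInsertBy_pairwise (fun a b => pvKey1 b ≤ pvKey1 a) pvBefore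
        (fun a b c h1 h2 => le_trans h2 h1) ?_ ?_ x acc hp
      · intro a b h
        simp [pvBefore] at h
        rcases h with h | ⟨h1, h2⟩ <;> omega
      · intro a b h
        simp only [pvBefore, Bool.or_eq_true, decide_eq_true_eq] at h
        have h1 : ¬ (pvKey1 b < pvKey1 a) := fun hc => h (Or.inl hc)
        omega
  exact hgen xs [] (by simp)

-- ===== VERDICT (by name: the statement is the Claim_ definition above) =====
theorem removeCoveredIntervals_stack_spec : Claim_equal_removeCoveredIntervals_stack := by
  intro intervals _ hpre
  unfold Spec_removeCoveredIntervals_stack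
  simp only [removeCoveredIntervals_stack, removeCoveredIntervals_stack_alt]
  set s := PySem.List.sorted2 intervals pvKey1 pvKey2 true with hs
  have hmem : ∀ iv ∈ s, iv.length = 2 := by
    intro iv hiv
    exact hpre iv ((PySem.List.sorted2_perm intervals pvKey1 pvKey2 true).mem_iff.1 hiv)
  have hpw : s.Pairwise (fun a b => pvKey1 b ≤ pvKey1 a) := pvSorted2_rev_pairwise intervals
  have hrepr := pvMap_repr s hmem
  set ps := s.map pvToPair with hps
  have hpwp : ps.Pairwise (fun a b => b.1 ≤ a.1) := by
    rw [hps, List.pairwise_map]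
    exact hpw.imp (fun {a b} h => h)
  have hA : s.foldl pvStepA ([], 0) = ps.foldl pvStepA' ([], 0) := by
    conv_lhs => rw [hrepr]
    rw [List.foldl_map]
    rfl
  have hB : s.reverse.foldl pvStepB (none, 0) = ps.reverse.foldl pvStepB' (none, 0) := by
    conv_lhs => rw [hrepr]
    rw [← List.map_reverse, List.foldl_map]
    rfl
  have hlen : s.length = ps.length := by rw [hps, List.length_map]
  have hglen := pvRECLEN ps
  rw [hA, hB, pvA1 ps [] 0 (by simp) hpwp, pvBfold ps.reverse none 0, hlen]
  simp only [List.length_nil]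
  omega
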